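-- pv_equiv track=rewrite | github.com/aslamovamir/codeSignalPractice | pair_of_shoes.py | solution
-- ===== SOURCE A (Python) =====
-- def solution(shoes):
--     if len(shoes) == 1 or len(shoes) == 0:
--         return False
--
--     # we will store the 2 types of shoes and their frequencies
--     # in 2 different dictionaries
--     Map0 = {}
--     Map1 = {}
--
--     for pair in shoes:
--         # if the type is 0
--         if pair[0] == 0:
--             if pair[1] not in Map0:
--                 Map0[pair[1]] = 1
--             else:
--                 Map0[pair[1]] += 1
--         # if the type is 1
--         else:
--             if pair[1] not in Map1:
--                 Map1[pair[1]] = 1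
--             else:
--                 Map1[pair[1]] += 1
--
--     # we will check both of the maps
--     for key, value in Map0.items():
--         if key in Map1:
--             # if the number of these shoes is not equal to each other
--             # we return false
--             if value != Map1[key]:
--                 return False
--         else:
--             return False
--
--     for key, value in Map1.items():
--         if key in Map0:
--             # if the number of these shoes is not equal to each other
--             # we return false
--             if value != Map0[key]:
--                 return False
--         else:
--             return False
--
--     return True
-- ===== SOURCE B (Python) =====
-- def solution(shoes):
--     # Sort-then-compare: the two type groups match iff their sorted size lists are equal.
--     if len(shoes) <= 1:
--         return False
--     sizes0 = sorted(p[1] for p in shoes if p[0] == 0)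
--     sizes1 = sorted(p[1] for p in shoes if p[0] != 0)
--     return sizes0 == sizes1
-- ===== Notes on version B (the rewrite author's own statement) =====
-- stated objective: simpler
-- what changed: Replaces the two frequency dictionaries and the two-directional dict-comparison loops with splitting the sizes by type, sorting each group and comparing the sorted lists.
import Mathlib
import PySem

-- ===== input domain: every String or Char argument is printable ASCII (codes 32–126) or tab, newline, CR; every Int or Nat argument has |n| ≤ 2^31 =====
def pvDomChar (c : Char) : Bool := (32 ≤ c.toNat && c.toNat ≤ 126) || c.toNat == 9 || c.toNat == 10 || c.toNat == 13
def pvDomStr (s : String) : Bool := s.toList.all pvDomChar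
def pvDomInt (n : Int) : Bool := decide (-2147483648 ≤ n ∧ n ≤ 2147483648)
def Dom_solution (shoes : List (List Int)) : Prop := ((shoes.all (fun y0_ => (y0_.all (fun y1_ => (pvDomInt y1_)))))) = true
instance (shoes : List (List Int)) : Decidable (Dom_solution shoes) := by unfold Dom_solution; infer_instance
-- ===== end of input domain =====

-- B replaces A's two frequency dictionaries and two dict-comparison loops by splitting the
-- sizes by type, sorting each group and comparing the sorted lists (objective: simpler).

-- pair[i] for i = 0,1; the default 0 is never reached inside Pre_solution (pairs have length ≥ 2)
def pvGet (p : List Int) (i : Int) : Int := (PySem.List.pyGet? p i).getD 0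

-- ===== PORT A =====
-- the body of both `if pair[1] not in MapX … else …` branches of A's first loop
def pvAStep (d : PySem.Dict Int Int) (s : Int) : PySem.Dict Int Int :=
  if ¬ d.contains s then d.insert s 1 else d.insert s (d.getD s 0 + 1)

def solution (shoes : List (List Int)) : Bool :=
  if shoes.length == 1 || shoes.length == 0 then false
  else
    let maps := shoes.foldl
      (fun (m : PySem.Dict Int Int × PySem.Dict Int Int) pair =>
        if pvGet pair 0 == 0 then (pvAStep m.1 (pvGet pair 1), m.2)
        else (m.1, pvAStep m.2 (pvGet pair 1)))
      (PySem.Dict.empty, PySem.Dict.empty)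
    let check0 := maps.1.items.all (fun kv =>
      if maps.2.contains kv.1 then kv.2 == maps.2.getD kv.1 0 else false)
    let check1 := maps.2.items.all (fun kv =>
      if maps.1.contains kv.1 then kv.2 == maps.1.getD kv.1 0 else false)
    check0 && check1

-- ===== PORT B =====
def solution_alt (shoes : List (List Int)) : Bool :=
  if shoes.length ≤ 1 then false
  else
    let sizes0 := PySem.List.sorted
      ((shoes.filter (fun p => pvGet p 0 == 0)).map (fun p => pvGet p 1)) (fun x => x) false
    let sizes1 := PySem.List.sorted
      ((shoes.filter (fun p => !(pvGet p 0 == 0))).map (fun p => pvGet p 1)) (fun x => x) false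
    sizes0 == sizes1

-- ===== PRECONDITION & SPEC =====
-- Pre_ excludes pairs shorter than 2 entries (when the main loop runs): there Python A raises IndexError.
def Pre_solution (shoes : List (List Int)) : Prop :=
  shoes.length ≤ 1 ∨ ∀ p ∈ shoes, 2 ≤ p.length
instance (shoes : List (List Int)) : Decidable (Pre_solution shoes) := by
  unfold Pre_solution; infer_instance
def pvWitness_solution : List (List Int) := [[0, 5], [1, 5]]

def Spec_solution (shoes : List (List Int)) (out : Bool) : Prop := out = solution_alt shoes
instance (shoes : List (List Int)) (out : Bool) : Decidable (Spec_solution shoes out) := by unfold Spec_solution; infer_instance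

-- ===== CLAIM (what is proved, stated in full; the proofs are below) =====
def Claim_equal_solution : Prop := ∀ (shoes : List (List Int)), Dom_solution shoes → Pre_solution shoes → Spec_solution shoes (solution shoes)

-- ===== LEMMAS AND PROOFS =====

lemma pvAStep_eq (d : PySem.Dict Int Int) (s : Int) :
    pvAStep d s = d.insert s (d.getD s 0 + 1) := by
  unfold pvAStep
  by_cases h : d.contains s = true
  · simp [h]
  · simp only [Bool.not_eq_true] at h
    simp [h, PySem.Dict.getD_of_not_contains (h := h)]

lemma pvFold_eq (shoes : List (List Int)) (d0 d1 : PySem.Dict Int Int) :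
    shoes.foldl
      (fun (m : PySem.Dict Int Int × PySem.Dict Int Int) pair =>
        if pvGet pair 0 == 0 then (pvAStep m.1 (pvGet pair 1), m.2)
        else (m.1, pvAStep m.2 (pvGet pair 1))) (d0, d1)
    = (((shoes.filter (fun p => pvGet p 0 == 0)).map (fun p => pvGet p 1)).foldl
         (fun d x => d.insert x (d.getD x 0 + 1)) d0,
       ((shoes.filter (fun p => !(pvGet p 0 == 0))).map (fun p => pvGet p 1)).foldl
         (fun d x => d.insert x (d.getD x 0 + 1)) d1) := by
  induction shoes generalizing d0 d1 with
  | nil => simp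
  | cons p rest ih =>
    by_cases h : pvGet p 0 = 0
    · simpa [h, pvAStep_eq] using
        ih (d0.insert (pvGet p 1) (d0.getD (pvGet p 1) 0 + 1)) d1
    · simpa [h, pvAStep_eq] using
        ih d0 (d1.insert (pvGet p 1) (d1.getD (pvGet p 1) 0 + 1))

-- A's check loop over Counter(l) against Counter(m) succeeds iff every size of l is in m with equal count
lemma pvLoop_iff (l m : List Int) :
    ((PySem.Dict.counter l).items.all (fun kv =>
        if (PySem.Dict.counter m).contains kv.1 then kv.2 == (PySem.Dict.counter m).getD kv.1 0 else false)) = true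
    ↔ ∀ k ∈ l, k ∈ m ∧ l.count k = m.count k := by
  rw [List.all_eq_true]
  simp only [PySem.Dict.items_counter, List.mem_map, PySem.Set.mem_ofList]
  constructor
  · intro h k hk
    have hh := h (k, (l.count k : Int)) ⟨k, hk, rfl⟩
    by_cases hc : (PySem.Dict.counter m).contains k = true
    · rw [if_pos hc] at hh
      rw [PySem.Dict.getD_counter] at hh
      have hkm : k ∈ m := by
        have := hc
        rw [PySem.Dict.contains_counter] at this
        simpa using this
      exact ⟨hkm, by simpa using (beq_iff_eq.mp hh)⟩
    · rw [if_neg hc] at hh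
      exact absurd hh (by simp)
  · intro h kv hkv
    obtain ⟨k, hk, rfl⟩ := hkv
    obtain ⟨hkm, hcnt⟩ := h k hk
    have hc : (PySem.Dict.counter m).contains k = true := by
      rw [PySem.Dict.contains_counter]; simpa using hkm
    rw [if_pos hc, PySem.Dict.getD_counter]
    simp only [beq_iff_eq]
    simpa using hcnt

-- A's two check loops together succeed iff the two size lists have equal counts everywhere
lemma pvCheck_iff (l0 l1 : List Int) :
    (((PySem.Dict.counter l0).items.all (fun kv =>
        if (PySem.Dict.counter l1).contains kv.1 then kv.2 == (PySem.Dict.counter l1).getD kv.1 0 else false)) &&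
     ((PySem.Dict.counter l1).items.all (fun kv =>
        if (PySem.Dict.counter l0).contains kv.1 then kv.2 == (PySem.Dict.counter l0).getD kv.1 0 else false))) = true
    ↔ ∀ k : Int, l0.count k = l1.count k := by
  rw [Bool.and_eq_true, pvLoop_iff, pvLoop_iff]
  constructor
  · rintro ⟨h0, h1⟩ k
    by_cases hk0 : k ∈ l0
    · exact (h0 k hk0).2
    · by_cases hk1 : k ∈ l1
      · exact absurd (h1 k hk1).1 hk0
      · rw [List.count_eq_zero.mpr hk0, List.count_eq_zero.mpr hk1]
  · intro h
    refine ⟨fun k hk => ⟨?_, h k⟩, fun k hk => ⟨?_, (h k).symm⟩⟩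
    · have : 0 < l1.count k := by
        rw [← h k]; exact List.count_pos_iff.mpr hk
      exact List.count_pos_iff.mp this
    · have : 0 < l0.count k := by
        rw [h k]; exact List.count_pos_iff.mpr hk
      exact List.count_pos_iff.mp this

-- ===== VERDICT (by name: the statement is the Claim_ definition above) =====
theorem solution_spec : Claim_equal_solution := by
  intro shoes _ _
  unfold Spec_solution solution solution_alt
  by_cases hlen : shoes.length ≤ 1
  · have h1 : (shoes.length == 1 || shoes.length == 0) = true := by
      simp only [Bool.or_eq_true, beq_iff_eq]; omega
    simp [h1, hlen]
  · have h1 : (shoes.length == 1 || shoes.length == 0) = false := by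
      simp only [Bool.or_eq_false_iff, beq_eq_false_iff_ne, ne_eq]
      omega
    simp only [h1, Bool.false_eq_true, if_false, hlen, if_false]
    rw [pvFold_eq]
    simp only [PySem.Dict.foldl_insert_getD_add_one_eq_counter]
    rw [Bool.eq_iff_iff, pvCheck_iff, beq_iff_eq,
      PySem.List.sorted_id_eq_sorted_id_iff_perm, List.perm_iff_count]
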